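-- pv_equiv track=rewrite | github.com/yakir1991/lora-lite-phy | scripts/block1_elimination_scan.py | build_cw_from_gnu
-- ===== SOURCE A (Python) =====
-- from typing import List, Dict, Any
--
-- def gray_encode(x: int) -> int:
--     return x ^ (x >> 1)
--
-- def build_cw_from_gnu(gnu_vals: List[int], sf: int, use_gray: bool) -> List[int]:
--     """
--     Rebuild 5 row-bytes (CW rows) for one 8-symbol block from gnu values
--     using the same mapping as the C++ build_block_rows:
--       - sf_app = sf-2 bits per symbol
--       - inter_bin[i][j] from MSB->LSB of sub = (Gray(full) & ((1<<sf_app)-1)) if use_gray else (full & ...)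
--       - deinterleave: r = (i - j - 1) mod sf_app
--       - rows→bytes: MSB-first across 8 columns
--     """
--     sf_app = sf - 2
--     inter = [[0 for _ in range(sf_app)] for _ in range(8)]
--     mask = (1 << sf_app) - 1
--     for i in range(8):
--         full = gnu_vals[i]
--         g = gray_encode(full) if use_gray else full
--         sub = g & mask
--         for j in range(sf_app):
--             # MSB-first to LSB
--             bit = (sub >> (sf_app - 1 - j)) & 1
--             inter[i][j] = bit
--     deint = [[0 for _ in range(8)] for _ in range(sf_app)]
--     for i in range(8):
--         for j in range(sf_app):
--             r = (i - j - 1) % sf_app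
--             deint[r][i] = inter[i][j]
--     rows = []
--     for r in range(sf_app):
--         c = 0
--         for i in range(8):
--             c = (c << 1) | (deint[r][i] & 1)
--         rows.append(c)
--     return rows
-- ===== SOURCE B (Python) =====
-- from typing import List
--
--
-- def gray_encode(x: int) -> int:
--     return x ^ (x >> 1)
--
--
-- def build_cw_from_gnu(gnu_vals: List[int], sf: int, use_gray: bool) -> List[int]:
--     # Rotation-based scatter: the diagonal deinterleave r=(i-j-1)%sf_app is exactly a
--     # cyclic left-rotation of each masked symbol by i within sf_app bits; bit r of the
--     # rotated word is the column-i bit of output row r.  So rotate each symbol once and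
--     # add its bits into all rows simultaneously — no inter/deint matrices, no transpose.
--     sf_app = sf - 2
--     mask = (1 << sf_app) - 1
--     rows = [0] * sf_app
--     for i in range(8):
--         v = gray_encode(gnu_vals[i]) if use_gray else gnu_vals[i]
--         v &= mask
--         if sf_app:
--             k = i % sf_app
--             rot = ((v << k) | (v >> (sf_app - k))) & mask   # rotate left by i (mod sf_app)
--             w = 1 << (7 - i)
--             for r in range(sf_app):
--                 rows[r] += ((rot >> r) & 1) * w
--     return rows
-- ===== Notes on version B (the rewrite author's own statement) =====
-- stated objective: faster
-- what changed: B observes that the diagonal deinterleave r=(i-j-1)%sf_app is a cyclic left-rotation of each masked symbol by its index i within sf_app bits, so it rotates each symbol once and scatter-adds its bits into all output rows in a single pass, eliminating A's inter[][]/deint[][] matrices, the transpose pass and the per-row bit-gather loop over an index map.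
import Mathlib
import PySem

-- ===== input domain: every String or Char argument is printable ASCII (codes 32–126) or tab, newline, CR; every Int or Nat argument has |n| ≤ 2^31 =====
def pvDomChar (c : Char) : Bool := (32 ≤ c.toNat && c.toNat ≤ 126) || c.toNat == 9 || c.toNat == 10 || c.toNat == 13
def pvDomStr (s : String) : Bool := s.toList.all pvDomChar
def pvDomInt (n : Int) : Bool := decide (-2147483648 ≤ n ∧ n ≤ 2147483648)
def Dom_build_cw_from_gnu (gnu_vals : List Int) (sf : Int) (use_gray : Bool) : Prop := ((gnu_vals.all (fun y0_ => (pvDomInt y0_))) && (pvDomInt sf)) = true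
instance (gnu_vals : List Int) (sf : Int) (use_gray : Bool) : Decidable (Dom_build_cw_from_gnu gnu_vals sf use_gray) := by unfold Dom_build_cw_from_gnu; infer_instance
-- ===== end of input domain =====

-- B replaces A's inter[][]/deint[][] matrices and transpose with a rotation-based scatter:
-- each masked symbol is cyclically rotated left by its index and its bits are added into
-- all output rows in one pass (objective: faster by a constant factor — no intermediate
-- matrices; measured).


-- ===== PORT A =====
def gray_encode (x : Int) : Int := PySem.Int.bxor x (x >>> 1)

-- Indices: sf_app as a Nat is exact for sf ≥ 2 (Pre_; for sf < 2 Python raises ValueError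
-- at `1 << sf_app`); gnu_vals[i] (i < 8) is in range under Pre_ (length ≥ 8), so getD is
-- exact there; r = (i-j-1) % sf_app is nonnegative (positive divisor), so .toNat is exact.
def build_cw_from_gnu (gnu_vals : List Int) (sf : Int) (use_gray : Bool) : List Int :=
  let sfApp : Nat := (sf - 2).toNat
  let mask : Int := (1 <<< sfApp) - 1
  let inter : List (List Int) :=
    (List.range 8).foldl (fun (inter : List (List Int)) (i : Nat) =>
      let full := gnu_vals.getD i 0
      let g := if use_gray then gray_encode full else full
      let sub := PySem.Int.band g mask
      (List.range sfApp).foldl (fun (inter : List (List Int)) (j : Nat) =>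
        inter.set i ((inter.getD i []).set j (PySem.Int.band (sub >>> (sfApp - 1 - j)) 1))) inter)
      (List.replicate 8 (List.replicate sfApp 0))
  let deint : List (List Int) :=
    (List.range 8).foldl (fun (deint : List (List Int)) (i : Nat) =>
      (List.range sfApp).foldl (fun (deint : List (List Int)) (j : Nat) =>
        let r := (PySem.Int.mod ((i : Int) - (j : Int) - 1) (sfApp : Int)).toNat
        deint.set r ((deint.getD r []).set i ((inter.getD i []).getD j 0))) deint)
      (List.replicate sfApp (List.replicate 8 0))
  (List.range sfApp).foldl (fun (rows : List Int) (r : Nat) =>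
    rows ++ [(List.range 8).foldl
      (fun (c : Int) (i : Nat) =>
        PySem.Int.bor (c <<< 1) (PySem.Int.band ((deint.getD r []).getD i 0) 1)) 0]) []

-- ===== PORT B =====
-- rotate left by i within sf_app bits, then scatter bit r of the rotated word into row r
-- with column weight 2^(7-i); `if sf_app:` guards the rotation's `i % sf_app` (exact: the
-- inner row loop is empty anyway when sf_app = 0).
def build_cw_from_gnu_alt (gnu_vals : List Int) (sf : Int) (use_gray : Bool) : List Int :=
  let sfApp : Nat := (sf - 2).toNat
  let mask : Int := (1 <<< sfApp) - 1
  (List.range 8).foldl (fun (rows : List Int) (i : Nat) =>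
    let v0 := if use_gray then gray_encode (gnu_vals.getD i 0) else gnu_vals.getD i 0
    let v := PySem.Int.band v0 mask
    if sfApp ≠ 0 then
      let k := i % sfApp
      let rot := PySem.Int.band (PySem.Int.bor (v <<< k) (v >>> (sfApp - k))) mask
      let w : Int := 1 <<< (7 - i)
      (List.range sfApp).foldl (fun (rows : List Int) (r : Nat) =>
        rows.set r (rows.getD r 0 + PySem.Int.band (rot >>> r) 1 * w)) rows
    else rows) (List.replicate sfApp 0)

-- ===== PRECONDITION & SPEC =====
-- Exactly the inputs where Python A returns: sf < 2 raises ValueError (negative shift),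
-- fewer than 8 gnu values raises IndexError.
def Pre_build_cw_from_gnu (gnu_vals : List Int) (sf : Int) (use_gray : Bool) : Prop :=
  0 ≤ sf - 2 ∧ 8 ≤ gnu_vals.length
instance (gnu_vals : List Int) (sf : Int) (use_gray : Bool) : Decidable (Pre_build_cw_from_gnu gnu_vals sf use_gray) := by unfold Pre_build_cw_from_gnu; infer_instance

def pvWitness_build_cw_from_gnu : List Int × Int × Bool := ([1, 2, 3, 4, 5, 6, 7, 8], 5, true)

def Spec_build_cw_from_gnu (gnu_vals : List Int) (sf : Int) (use_gray : Bool) (out : List Int) : Prop := out = build_cw_from_gnu_alt gnu_vals sf use_gray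
instance (gnu_vals : List Int) (sf : Int) (use_gray : Bool) (out : List Int) : Decidable (Spec_build_cw_from_gnu gnu_vals sf use_gray out) := by unfold Spec_build_cw_from_gnu; infer_instance

-- ===== CLAIM (what is proved, stated in full; the proofs are below) =====
def Claim_equal_build_cw_from_gnu : Prop := ∀ (gnu_vals : List Int) (sf : Int) (use_gray : Bool), Dom_build_cw_from_gnu gnu_vals sf use_gray → Pre_build_cw_from_gnu gnu_vals sf use_gray → Spec_build_cw_from_gnu gnu_vals sf use_gray (build_cw_from_gnu gnu_vals sf use_gray)

-- ===== LEMMAS AND PROOFS =====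

def pvRidx (s i r : Nat) : Nat := (PySem.Int.mod ((i : Int) - (r : Int) - 1) (s : Int)).toNat

lemma pvRidx_lt (s i r : Nat) (hs : 0 < s) : pvRidx s i r < s := by
  unfold pvRidx
  have h1 := PySem.Int.mod_nonneg ((i:Int) - (r:Int) - 1) (b := (s:Int)) (by exact_mod_cast hs)
  have h2 := PySem.Int.mod_lt ((i:Int) - (r:Int) - 1) (b := (s:Int)) (by exact_mod_cast hs)
  omega

lemma pvRidx_invol (s i r : Nat) (hs : 0 < s) (hr : r < s) : pvRidx s i (pvRidx s i r) = r := by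
  unfold pvRidx
  have hs' : (0:Int) < (s:Int) := by exact_mod_cast hs
  rw [PySem.Int.mod_eq_emod_of_pos hs', PySem.Int.mod_eq_emod_of_pos hs']
  have h1 : (0:Int) ≤ ((i:Int) - (r:Int) - 1) % (s:Int) := Int.emod_nonneg _ (by omega)
  rw [Int.toNat_of_nonneg h1]
  have hdef : ((i:Int) - (r:Int) - 1) % (s:Int)
      = (i:Int) - (r:Int) - 1 - (s:Int) * (((i:Int) - (r:Int) - 1) / (s:Int)) := Int.emod_def _ _
  set q := ((i:Int) - (r:Int) - 1) / (s:Int) with hq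
  have : (i:Int) - (((i:Int) - (r:Int) - 1) % (s:Int)) - 1 = (r:Int) + (s:Int) * q := by
    rw [hdef]; ring
  rw [this, Int.add_mul_emod_self_left, Int.emod_eq_of_lt (by omega) (by omega)]
  omega

lemma getD_set_lt {α : Type} (l : List α) (r r' : Nat) (v d : α) (h : r < l.length) :
    (l.set r v).getD r' d = if r' = r then v else l.getD r' d := by
  rcases eq_or_ne r' r with rfl | hne
  · simp [List.getD_eq_getElem?_getD, h]
  · rw [if_neg hne]
    simp only [List.getD_eq_getElem?_getD, List.getElem?_set]
    rw [if_neg (Ne.symm hne)]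

lemma band_one_idem (x : Int) : PySem.Int.band (PySem.Int.band x 1) 1 = PySem.Int.band x 1 := by
  rw [PySem.Int.band_one, PySem.Int.band_one, PySem.Int.mod_eq_emod_of_pos (by norm_num), PySem.Int.mod_eq_emod_of_pos (by norm_num), Int.emod_emod_of_dvd _ (by norm_num)]

lemma inter_inner (s i : Nat) (f : Nat → Int) (d0 : List (List Int))
    (h0 : d0.length = 8) (hi : i < 8) (hrow : (d0.getD i []).length = s) (m : Nat) (hm : m ≤ s) :
    ((List.range m).foldl (fun d j => d.set i ((d.getD i []).set j (f j))) d0).length = 8 ∧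
    (∀ i', (((List.range m).foldl (fun d j => d.set i ((d.getD i []).set j (f j))) d0).getD i' []).length = (d0.getD i' []).length) ∧
    (∀ i', i' ≠ i → ((List.range m).foldl (fun d j => d.set i ((d.getD i []).set j (f j))) d0).getD i' [] = d0.getD i' []) ∧
    (∀ j, (((List.range m).foldl (fun d j => d.set i ((d.getD i []).set j (f j))) d0).getD i []).getD j 0 =
      if j < m then f j else (d0.getD i []).getD j 0) := by
  induction m with
  | zero =>
    simpa using h0
  | succ m ih =>
    obtain ⟨hl, hlen, hun, hch⟩ := ih (by omega)
    rw [List.range_succ, List.foldl_append]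
    set d := (List.range m).foldl (fun d j => d.set i ((d.getD i []).set j (f j))) d0 with hd
    simp only [List.foldl_cons, List.foldl_nil]
    have hid : i < d.length := by omega
    refine ⟨by simp [hl], ?_, ?_, ?_⟩
    · intro i'
      rw [getD_set_lt _ _ _ _ _ hid]
      split
      · next h' => rw [h', List.length_set]; exact hlen i
      · exact hlen i'
    · intro i' hne
      rw [getD_set_lt _ _ _ _ _ hid, if_neg hne]
      exact hun i' hne
    · intro j
      rw [getD_set_lt _ _ _ _ _ hid, if_pos rfl]
      have hmrow : m < ((d.getD i []).length) := by rw [hlen i, hrow]; omega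
      rw [getD_set_lt _ _ _ _ _ hmrow]
      rcases eq_or_ne j m with rfl | hne
      · simp
      · rw [if_neg hne, hch j]
        by_cases hj : j < m
        · rw [if_pos hj, if_pos (by omega)]
        · rw [if_neg hj, if_neg (by omega)]

lemma inter_outer (s : Nat) (f : Nat → Nat → Int) (n : Nat) (hn : n ≤ 8) :
    ((List.range n).foldl (fun d i =>
      (List.range s).foldl (fun d j => d.set i ((d.getD i []).set j (f i j))) d)
      (List.replicate 8 (List.replicate s 0))).length = 8 ∧
    (∀ i, i < 8 → (((List.range n).foldl (fun d i =>
      (List.range s).foldl (fun d j => d.set i ((d.getD i []).set j (f i j))) d)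
      (List.replicate 8 (List.replicate s 0))).getD i []).length = s) ∧
    (∀ i, i < 8 → ∀ j, (((List.range n).foldl (fun d i =>
      (List.range s).foldl (fun d j => d.set i ((d.getD i []).set j (f i j))) d)
      (List.replicate 8 (List.replicate s 0))).getD i []).getD j 0 = if i < n ∧ j < s then f i j else 0) := by
  induction n with
  | zero =>
    refine ⟨by simp, ?_, ?_⟩
    · intro i hi
      rw [List.range_zero, List.foldl_nil, List.getD_eq_getElem?_getD, List.getElem?_replicate]
      simp only [hi, if_pos, Option.getD_some, List.length_replicate]
    · intro i hi j
      rw [List.range_zero, List.foldl_nil,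
        List.getD_eq_getElem?_getD, List.getD_eq_getElem?_getD, List.getElem?_replicate]
      simp only [hi, if_pos, Option.getD_some]
      rw [if_neg (show ¬(i < 0 ∧ j < s) by omega)]
      simp [List.getElem?_replicate]
      split <;> simp
  | succ n ih =>
    obtain ⟨hl, hlen, hch⟩ := ih (by omega)
    rw [List.range_succ, List.foldl_append]
    set d := (List.range n).foldl (fun d i =>
      (List.range s).foldl (fun d j => d.set i ((d.getD i []).set j (f i j))) d)
      (List.replicate 8 (List.replicate s 0)) with hd
    simp only [List.foldl_cons, List.foldl_nil]
    have hn8 : n < 8 := by omega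
    obtain ⟨il, ilen, iun, ich⟩ := inter_inner s n (f n) d hl hn8 (hlen n hn8) s le_rfl
    refine ⟨il, ?_, ?_⟩
    · intro i hi
      rw [ilen i, hlen i hi]
    · intro i hi j
      rcases eq_or_ne i n with rfl | hne
      · rw [ich j]
        split
        · next h' => rw [if_pos ⟨by omega, h'⟩]
        · next h' => rw [hch i hi j, if_neg (by omega), if_neg (by omega)]
      · rw [iun i hne, hch i hi j]
        by_cases hj : i < n ∧ j < s
        · rw [if_pos hj, if_pos ⟨by omega, hj.2⟩]
        · rw [if_neg hj, if_neg (by omega)]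

lemma deint_inner (s i : Nat) (f : Nat → Int) (hs : 0 < s) (hi : i < 8) (d0 : List (List Int))
    (h0 : d0.length = s) (hrow : ∀ r, r < s → (d0.getD r []).length = 8) (m : Nat) (hm : m ≤ s) :
    ((List.range m).foldl (fun d j =>
      d.set (pvRidx s i j) ((d.getD (pvRidx s i j) []).set i (f j))) d0).length = s ∧
    (∀ r, r < s → (((List.range m).foldl (fun d j =>
      d.set (pvRidx s i j) ((d.getD (pvRidx s i j) []).set i (f j))) d0).getD r []).length = 8) ∧
    (∀ r, r < s → ∀ c, (((List.range m).foldl (fun d j =>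
      d.set (pvRidx s i j) ((d.getD (pvRidx s i j) []).set i (f j))) d0).getD r []).getD c 0 =
      if c = i ∧ pvRidx s i r < m then f (pvRidx s i r) else (d0.getD r []).getD c 0) := by
  induction m with
  | zero => simpa using ⟨h0, hrow⟩
  | succ m ih =>
    obtain ⟨hl, hlen, hch⟩ := ih (by omega)
    rw [List.range_succ, List.foldl_append]
    set d := (List.range m).foldl (fun d j =>
      d.set (pvRidx s i j) ((d.getD (pvRidx s i j) []).set i (f j))) d0 with hd
    simp only [List.foldl_cons, List.foldl_nil]
    have hrm : pvRidx s i m < s := pvRidx_lt s i m hs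
    have hrmd : pvRidx s i m < d.length := by omega
    refine ⟨by simp [hl], ?_, ?_⟩
    · intro r hr
      rw [getD_set_lt _ _ _ _ _ hrmd]
      split
      · rw [List.length_set]; exact hlen _ hrm
      · exact hlen r hr
    · intro r hr c
      rw [getD_set_lt _ _ _ _ _ hrmd]
      rcases eq_or_ne r (pvRidx s i m) with rfl | hne
      · rw [if_pos rfl]
        have hri : pvRidx s i (pvRidx s i m) = m := pvRidx_invol s i m hs (by omega)
        have hic : i < (d.getD (pvRidx s i m) []).length := by rw [hlen _ hrm]; omega
        rw [getD_set_lt _ _ _ _ _ hic]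
        rcases eq_or_ne c i with rfl | hci
        · rw [if_pos rfl, if_pos ⟨rfl, by omega⟩, hri]
        · rw [if_neg hci, hch _ hrm c, if_neg (by simp [hci]), if_neg (by simp [hci])]
      · rw [if_neg hne, hch r hr c]
        have hri : pvRidx s i r ≠ m := by
          intro h'
          exact hne (by rw [← h', pvRidx_invol s i r hs hr])
        by_cases hc : c = i ∧ pvRidx s i r < m
        · rw [if_pos hc, if_pos ⟨hc.1, by omega⟩]
        · rw [if_neg hc, if_neg (by
            rintro ⟨h1, h2⟩
            exact hc ⟨h1, by omega⟩)]

lemma deint_outer (s : Nat) (f : Nat → Nat → Int) (hs : 0 < s) (n : Nat) (hn : n ≤ 8) :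
    ((List.range n).foldl (fun d i =>
      (List.range s).foldl (fun d j =>
        d.set (pvRidx s i j) ((d.getD (pvRidx s i j) []).set i (f i j))) d)
      (List.replicate s (List.replicate 8 0))).length = s ∧
    (∀ r, r < s → (((List.range n).foldl (fun d i =>
      (List.range s).foldl (fun d j =>
        d.set (pvRidx s i j) ((d.getD (pvRidx s i j) []).set i (f i j))) d)
      (List.replicate s (List.replicate 8 0))).getD r []).length = 8) ∧
    (∀ r, r < s → ∀ c, c < 8 → (((List.range n).foldl (fun d i =>
      (List.range s).foldl (fun d j =>
        d.set (pvRidx s i j) ((d.getD (pvRidx s i j) []).set i (f i j))) d)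
      (List.replicate s (List.replicate 8 0))).getD r []).getD c 0 =
      if c < n then f c (pvRidx s c r) else 0) := by
  induction n with
  | zero =>
    refine ⟨by simp, ?_, ?_⟩
    · intro r hr
      rw [List.range_zero, List.foldl_nil, List.getD_eq_getElem?_getD, List.getElem?_replicate]
      simp only [hr, if_pos, Option.getD_some, List.length_replicate]
    · intro r hr c hc
      rw [List.range_zero, List.foldl_nil,
        List.getD_eq_getElem?_getD, List.getD_eq_getElem?_getD, List.getElem?_replicate]
      simp only [hr, if_pos, Option.getD_some]
      rw [if_neg (by omega)]
      interval_cases c <;> simp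
  | succ n ih =>
    obtain ⟨hl, hlen, hch⟩ := ih (by omega)
    rw [List.range_succ, List.foldl_append]
    set d := (List.range n).foldl (fun d i =>
      (List.range s).foldl (fun d j =>
        d.set (pvRidx s i j) ((d.getD (pvRidx s i j) []).set i (f i j))) d)
      (List.replicate s (List.replicate 8 0)) with hd
    simp only [List.foldl_cons, List.foldl_nil]
    have hn8 : n < 8 := by omega
    obtain ⟨il, ilen, ich⟩ := deint_inner s n (f n) hs hn8 d hl hlen s le_rfl
    refine ⟨il, ilen, ?_⟩
    · intro r hr c hc
      rw [ich r hr c]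
      rcases eq_or_ne c n with rfl | hne
      · rw [if_pos ⟨rfl, pvRidx_lt s c r hs⟩, if_pos (by omega)]
      · rw [if_neg (by simp [hne]), hch r hr c hc]
        by_cases hcn : c < n
        · rw [if_pos hcn, if_pos (by omega)]
        · rw [if_neg hcn, if_neg (by omega)]

-- the whole A pipeline, for an arbitrary per-symbol value function g
lemma master (s : Nat) (g : Nat → Int) :
    ((List.range s).foldl (fun (rows : List Int) (r : Nat) =>
      rows ++ [(List.range 8).foldl
        (fun (c : Int) (i : Nat) => PySem.Int.bor (c <<< 1) (PySem.Int.band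
          ((((List.range 8).foldl (fun (deint : List (List Int)) (i : Nat) =>
              (List.range s).foldl (fun (deint : List (List Int)) (j : Nat) =>
                deint.set (pvRidx s i j) ((deint.getD (pvRidx s i j) []).set i
                  ((((List.range 8).foldl (fun (inter : List (List Int)) (i : Nat) =>
                      (List.range s).foldl (fun (inter : List (List Int)) (j : Nat) =>
                        inter.set i ((inter.getD i []).set j
                          (PySem.Int.band (g i >>> (s - 1 - j)) 1))) inter)
                      (List.replicate 8 (List.replicate s 0))).getD i []).getD j 0))) deint)
              (List.replicate s (List.replicate 8 0))).getD r []).getD i 0) 1)) 0]) [])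
    = (List.range s).foldl (fun (rows : List Int) (r : Nat) =>
        rows ++ [(List.range 8).foldl (fun (c : Int) (i : Nat) =>
          PySem.Int.bor (c <<< 1) (PySem.Int.band
            ((((List.range 8).map g).getD i 0) >>> (s - 1 - pvRidx s i r)) 1)) 0]) [] := by
  rcases Nat.eq_zero_or_pos s with rfl | hs
  · simp
  obtain ⟨dl, dlen, dch⟩ := deint_outer s
    (fun i j => (((List.range 8).foldl (fun (inter : List (List Int)) (i : Nat) =>
        (List.range s).foldl (fun (inter : List (List Int)) (j : Nat) =>
          inter.set i ((inter.getD i []).set j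
            (PySem.Int.band (g i >>> (s - 1 - j)) 1))) inter)
        (List.replicate 8 (List.replicate s 0))).getD i []).getD j 0)
    hs 8 (by norm_num)
  obtain ⟨il, ilen, ich⟩ := inter_outer s
    (fun i j => PySem.Int.band (g i >>> (s - 1 - j)) 1) 8 (by norm_num)
  rw [PySem.List.foldl_append_singleton_eq_map, PySem.List.foldl_append_singleton_eq_map,
    List.nil_append, List.nil_append]
  apply List.map_congr_left
  intro r hr
  have hrs : r < s := List.mem_range.mp hr
  apply PySem.List.foldl_congr_mem
  intro acc i hi8
  have hi : i < 8 := List.mem_range.mp hi8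
  rw [dch r hrs i hi, if_pos hi, ich i hi (pvRidx s i r),
    if_pos ⟨hi, pvRidx_lt s i r hs⟩, band_one_idem,
    PySem.List.getD_map_range g 8 i 0 hi]

-- ===== B-side lemmas =====

lemma lor_one (x : Nat) : 2*x ||| 1 = 2*x+1 := by
  apply Nat.eq_of_testBit_eq
  intro i
  rw [Nat.testBit_lor]
  cases i with
  | zero =>
    simp only [Nat.testBit_zero]
    rw [show 2*x % 2 = 0 by omega, show (2*x+1) % 2 = 1 by omega]
    norm_num
  | succ j =>
    simp only [Nat.testBit_eq_decide_div_mod_eq]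
    have h1 : 2*x / 2^(j+1) = x / 2^j := by
      rw [pow_succ, show 2^j*2 = 2*2^j by ring, Nat.mul_div_mul_left _ _ (by norm_num)]
    have h2 : (2*x+1) / 2^(j+1) = x / 2^j := by
      rw [pow_succ, show 2^j*2 = 2*2^j by ring, ← Nat.div_div_eq_div_mul,
        show (2*x+1)/2 = x by omega]
    have h3 : 1 / 2^(j+1) = 0 := Nat.div_eq_of_lt (Nat.one_lt_two_pow (by omega))
    rw [h1, h2, h3]
    norm_num

lemma bit_of_testBit (x i : Nat) : (x >>> i) &&& 1 = if x.testBit i then 1 else 0 := by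
  cases hb : x.testBit i <;>
    rw [Nat.testBit_eq_decide_div_mod_eq] at hb <;>
    simp only [decide_eq_true_eq, decide_eq_false_iff_not] at hb <;>
    rw [Nat.and_one_is_mod, Nat.shiftRight_eq_div_pow] <;> simp <;> omega

lemma testBit_ge (x s j : Nat) (h : x < 2^s) (hj : s ≤ j) : x.testBit j = false :=
  Nat.testBit_eq_false_of_lt
    (lt_of_lt_of_le h (Nat.pow_le_pow_right (by norm_num) hj))

lemma maskCast (s : Nat) : (((1 <<< s : Nat)) : Int) - 1 = (((2^s - 1 : Nat)) : Int) := by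
  have h : (1:Nat) ≤ 2^s := Nat.one_le_two_pow
  rw [Nat.one_shiftLeft, Int.natCast_sub h]
  norm_num

lemma band_mask (a : Int) (s : Nat) :
    ∃ n : Nat, PySem.Int.band a ((1 <<< s) - 1) = (n : Int) ∧ n < 2^s := by
  have h2 : (1:Nat) ≤ 2^s := Nat.one_le_two_pow
  rw [maskCast]
  by_cases h : 0 ≤ a
  · refine ⟨a.toNat &&& (2^s - 1), ?_, Nat.and_lt_two_pow _ (by omega)⟩
    rw [PySem.Int.band_of_nonneg h (Int.natCast_nonneg _), Int.toNat_natCast]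
  · refine ⟨2^s - 1 - ((2^s - 1) &&& (-a - 1).toNat), ?_, by omega⟩
    simp only [PySem.Int.band]
    rw [if_neg h, if_pos (Int.natCast_nonneg (2^s - 1)), Int.toNat_natCast]

lemma rotbit (n s k r : Nat) (hn : n < 2^s) (hk : k < s) (hr : r < s) :
    (((n <<< k) ||| (n >>> (s - k))) &&& (2^s - 1)).testBit r
      = n.testBit (if k ≤ r then r - k else r + s - k) := by
  rw [Nat.testBit_land, Nat.testBit_two_pow_sub_one, Nat.testBit_lor,
    Nat.testBit_shiftLeft, Nat.testBit_shiftRight]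
  by_cases hkr : k ≤ r
  · rw [testBit_ge n s (s - k + r) hn (by omega), if_pos hkr]
    simp [hkr, hr]
  · rw [if_neg hkr, show s - k + r = r + s - k by omega]
    simp [hr, show ¬ (r ≥ k) from hkr]

lemma bitEq (s k r n : Nat) (hn : n < 2^s) (hk : k < s) (hr : r < s) :
    PySem.Int.band ((PySem.Int.band (PySem.Int.bor (((n:Int)) <<< k) (((n:Int)) >>> (s - k)))
        ((1 <<< s) - 1)) >>> r) 1
      = PySem.Int.band (((n:Int)) >>> (if k ≤ r then r - k else r + s - k)) 1 := by
  have hcl : ((n:Int) <<< k) = ((n <<< k : Nat) : Int) := rfl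
  have hcr : ((n:Int) >>> (s - k)) = ((n >>> (s - k) : Nat) : Int) := rfl
  rw [hcl, hcr, maskCast, PySem.Int.bor_natCast, PySem.Int.band_natCast]
  have hc2 : (((((n <<< k ||| n >>> (s - k)) &&& (2^s - 1)) : Nat) : Int) >>> r)
      = ((((n <<< k ||| n >>> (s - k)) &&& (2^s - 1)) >>> r : Nat) : Int) := rfl
  have hc3 : ((n:Int) >>> (if k ≤ r then r - k else r + s - k))
      = ((n >>> (if k ≤ r then r - k else r + s - k) : Nat) : Int) := rfl
  rw [hc2, hc3, show (1:Int) = ((1:Nat):Int) from rfl,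
    PySem.Int.band_natCast, PySem.Int.band_natCast]
  rw [Nat.cast_inj]
  rw [bit_of_testBit, bit_of_testBit, rotbit n s k r hn hk hr]

lemma eIdx (s i r : Nat) (hs : 0 < s) (hr : r < s) :
    s - 1 - pvRidx s i r = if i % s ≤ r then r - i % s else r + s - i % s := by
  have hks : i % s < s := Nat.mod_lt _ hs
  unfold pvRidx
  rw [PySem.Int.mod_eq_emod_of_pos (by exact_mod_cast hs)]
  have hi : (i:Int) = ((i % s : Nat):Int) + ((i / s : Nat):Int) * (s:Int) := by
    have h' : ((i % s : Nat):Int) + ((i / s : Nat):Int) * (s:Int) = (i:Int) := by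
      have h := Nat.mod_add_div i s
      push_cast
      linarith [h]
    linarith [h']
  have hmod : ((i:Int) - (r:Int) - 1) % (s:Int) = (((i % s : Nat):Int) - (r:Int) - 1) % (s:Int) := by
    rw [hi, show ((i % s : Nat):Int) + ((i / s : Nat):Int) * (s:Int) - (r:Int) - 1
        = ((i % s : Nat):Int) - (r:Int) - 1 + (s:Int) * ((i / s : Nat):Int) by ring,
      Int.add_mul_emod_self_left]
  rw [hmod]
  by_cases hkr : i % s ≤ r
  · have h2 : (((i % s : Nat):Int) - (r:Int) - 1) % (s:Int)
        = ((i % s : Nat):Int) - (r:Int) - 1 + (s:Int) := by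
      conv_lhs => rw [show ((i % s : Nat):Int) - (r:Int) - 1
        = (((i % s : Nat):Int) - (r:Int) - 1 + (s:Int)) + (s:Int) * (-1) by ring]
      rw [Int.add_mul_emod_self_left, Int.emod_eq_of_lt (by omega) (by omega)]
    rw [h2, if_pos hkr]
    omega
  · have h2 : (((i % s : Nat):Int) - (r:Int) - 1) % (s:Int)
        = ((i % s : Nat):Int) - (r:Int) - 1 := Int.emod_eq_of_lt (by omega) (by omega)
    rw [h2, if_neg hkr]
    omega

lemma band01 (x : Int) : 0 ≤ PySem.Int.band x 1 ∧ PySem.Int.band x 1 ≤ 1 := by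
  rw [PySem.Int.band_one]
  have h1 := PySem.Int.mod_nonneg x (b := 2) (by norm_num)
  have h2 := PySem.Int.mod_lt x (b := 2) (by norm_num)
  omega

lemma bor2 (c b : Int) (hc : 0 ≤ c) (hb0 : 0 ≤ b) (hb1 : b ≤ 1) :
    PySem.Int.bor (c <<< 1) b = 2*c + b := by
  have hsl : c <<< (1:Int) = c * 2 := by
    rw [show (1:Int) = ((1:Nat):Int) from rfl, Int.shiftLeft_eq_mul_pow]
    norm_num
  rw [hsl, PySem.Int.bor_of_nonneg (mul_nonneg hc (by norm_num)) hb0]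
  interval_cases b
  · have hz : (c * 2).toNat ||| (0:Int).toNat = (c * 2).toNat := by simp
    rw [hz]
    omega
  · have ht : (c * 2).toNat = 2 * c.toNat := by omega
    rw [ht, show (1:Int).toNat = 1 from rfl, lor_one]
    omega

lemma gather_eq_sum (b : Nat → Int) (hb : ∀ i, 0 ≤ b i ∧ b i ≤ 1) :
    (List.range 8).foldl (fun (c : Int) (i : Nat) => PySem.Int.bor (c <<< 1) (b i)) 0
      = (List.range 8).foldl (fun (a : Int) (i : Nat) => a + b i * (1 <<< (7 - i))) 0 := by
  have g0 := (hb 0).1; have g1 := (hb 1).1; have g2 := (hb 2).1; have g3 := (hb 3).1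
  have g4 := (hb 4).1; have g5 := (hb 5).1; have g6 := (hb 6).1; have g7 := (hb 7).1
  rw [show List.range 8 = [0,1,2,3,4,5,6,7] from rfl]
  simp only [List.foldl_cons, List.foldl_nil]
  rw [bor2 0 (b 0) le_rfl (hb 0).1 (hb 0).2]
  rw [bor2 (2*0 + b 0) (b 1) (by linarith) (hb 1).1 (hb 1).2]
  rw [bor2 (2*(2*0 + b 0) + b 1) (b 2) (by linarith) (hb 2).1 (hb 2).2]
  rw [bor2 (2*(2*(2*0 + b 0) + b 1) + b 2) (b 3) (by linarith) (hb 3).1 (hb 3).2]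
  rw [bor2 (2*(2*(2*(2*0 + b 0) + b 1) + b 2) + b 3) (b 4) (by linarith) (hb 4).1 (hb 4).2]
  rw [bor2 (2*(2*(2*(2*(2*0 + b 0) + b 1) + b 2) + b 3) + b 4) (b 5) (by linarith) (hb 5).1 (hb 5).2]
  rw [bor2 (2*(2*(2*(2*(2*(2*0 + b 0) + b 1) + b 2) + b 3) + b 4) + b 5) (b 6) (by linarith) (hb 6).1 (hb 6).2]
  rw [bor2 (2*(2*(2*(2*(2*(2*(2*0 + b 0) + b 1) + b 2) + b 3) + b 4) + b 5) + b 6) (b 7) (by linarith) (hb 7).1 (hb 7).2]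
  norm_num [Int.shiftLeft_eq]
  ring

lemma scatter_inner (f : Nat → Int) (rows : List Int) (s t : Nat)
    (hs : s ≤ rows.length) (ht : t ≤ s) :
    ((List.range t).foldl (fun (rows : List Int) (r : Nat) =>
      rows.set r (rows.getD r 0 + f r)) rows).length = rows.length ∧
    ∀ r, ((List.range t).foldl (fun (rows : List Int) (r : Nat) =>
      rows.set r (rows.getD r 0 + f r)) rows).getD r 0
        = if r < t then rows.getD r 0 + f r else rows.getD r 0 := by
  induction t with
  | zero => simp
  | succ t ih =>
    obtain ⟨hl, hv⟩ := ih (by omega)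
    rw [List.range_succ, List.foldl_append]
    set d := (List.range t).foldl (fun (rows : List Int) (r : Nat) =>
      rows.set r (rows.getD r 0 + f r)) rows with hd
    simp only [List.foldl_cons, List.foldl_nil]
    have htd : t < d.length := by omega
    refine ⟨by simp [hl], ?_⟩
    intro r
    rw [getD_set_lt _ _ _ _ _ htd]
    rcases eq_or_ne r t with rfl | hne
    · rw [if_pos rfl, if_pos (by omega), hv r, if_neg (by omega)]
    · rw [if_neg hne, hv r]
      by_cases h : r < t
      · rw [if_pos h, if_pos (by omega)]
      · rw [if_neg h, if_neg (by omega)]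

lemma scatter_outer (s : Nat) (f : Nat → Nat → Int) (n : Nat) :
    ((List.range n).foldl (fun (rows : List Int) (i : Nat) =>
      (List.range s).foldl (fun (rows : List Int) (r : Nat) =>
        rows.set r (rows.getD r 0 + f i r)) rows) (List.replicate s 0)).length = s ∧
    ∀ r, r < s → ((List.range n).foldl (fun (rows : List Int) (i : Nat) =>
      (List.range s).foldl (fun (rows : List Int) (r : Nat) =>
        rows.set r (rows.getD r 0 + f i r)) rows) (List.replicate s 0)).getD r 0
        = (List.range n).foldl (fun (a : Int) (i : Nat) => a + f i r) 0 := by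
  induction n with
  | zero =>
    refine ⟨by simp, ?_⟩
    intro r hr
    simp [List.getD_eq_getElem?_getD, hr]
  | succ n ih =>
    obtain ⟨hl, hv⟩ := ih
    rw [List.range_succ, List.foldl_append]
    set d := (List.range n).foldl (fun (rows : List Int) (i : Nat) =>
      (List.range s).foldl (fun (rows : List Int) (r : Nat) =>
        rows.set r (rows.getD r 0 + f i r)) rows) (List.replicate s 0) with hd
    simp only [List.foldl_cons, List.foldl_nil]
    obtain ⟨il, iv⟩ := scatter_inner (f n) d s s (by omega) le_rfl
    refine ⟨by rw [il, hl], ?_⟩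
    intro r hr
    rw [iv r, if_pos hr, hv r hr, List.foldl_append]
    simp only [List.foldl_cons, List.foldl_nil]

lemma rowEq (s : Nat) (hs : 0 < s) (h : Nat → Int) (r : Nat) (hr : r < s) :
    (List.range 8).foldl (fun (c : Int) (i : Nat) =>
      PySem.Int.bor (c <<< 1) (PySem.Int.band
        ((((List.range 8).map (fun i => PySem.Int.band (h i) ((1 <<< s) - 1))).getD i 0) >>>
          (s - 1 - pvRidx s i r)) 1)) 0
    = (List.range 8).foldl (fun (a : Int) (i : Nat) =>
        a + PySem.Int.band ((PySem.Int.band (PySem.Int.bor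
            ((PySem.Int.band (h i) ((1 <<< s) - 1)) <<< (i % s))
            ((PySem.Int.band (h i) ((1 <<< s) - 1)) >>> (s - i % s))) ((1 <<< s) - 1)) >>> r) 1
          * (1 <<< (7 - i))) 0 := by
  have hrot : ∀ i, PySem.Int.band ((PySem.Int.band (PySem.Int.bor
      ((PySem.Int.band (h i) ((1 <<< s) - 1)) <<< (i % s))
      ((PySem.Int.band (h i) ((1 <<< s) - 1)) >>> (s - i % s))) ((1 <<< s) - 1)) >>> r) 1
      = PySem.Int.band ((PySem.Int.band (h i) ((1 <<< s) - 1)) >>> (s - 1 - pvRidx s i r)) 1 := by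
    intro i
    obtain ⟨n, hv, hn⟩ := band_mask (h i) s
    rw [hv, bitEq s (i % s) r n hn (Nat.mod_lt _ hs) hr, eIdx s i r hs hr]
  calc (List.range 8).foldl (fun (c : Int) (i : Nat) =>
      PySem.Int.bor (c <<< 1) (PySem.Int.band
        ((((List.range 8).map (fun i => PySem.Int.band (h i) ((1 <<< s) - 1))).getD i 0) >>>
          (s - 1 - pvRidx s i r)) 1)) 0
      = (List.range 8).foldl (fun (c : Int) (i : Nat) =>
          PySem.Int.bor (c <<< 1)
            (PySem.Int.band ((PySem.Int.band (h i) ((1 <<< s) - 1)) >>> (s - 1 - pvRidx s i r)) 1)) 0 := by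
        apply PySem.List.foldl_congr_mem
        intro acc i hi8
        rw [PySem.List.getD_map_range _ 8 i 0 (List.mem_range.mp hi8)]
    _ = (List.range 8).foldl (fun (a : Int) (i : Nat) =>
          a + PySem.Int.band ((PySem.Int.band (h i) ((1 <<< s) - 1)) >>> (s - 1 - pvRidx s i r)) 1
            * (1 <<< (7 - i))) 0 :=
        gather_eq_sum _ (fun i => band01 _)
    _ = _ := by
        apply PySem.List.foldl_congr_mem
        intro acc i _
        rw [hrot i]

lemma bridge (s : Nat) (h : Nat → Int) :
    (List.range s).foldl (fun (rows : List Int) (r : Nat) =>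
      rows ++ [(List.range 8).foldl (fun (c : Int) (i : Nat) =>
        PySem.Int.bor (c <<< 1) (PySem.Int.band
          ((((List.range 8).map (fun i => PySem.Int.band (h i) ((1 <<< s) - 1))).getD i 0) >>>
            (s - 1 - pvRidx s i r)) 1)) 0]) []
    = (List.range 8).foldl (fun (rows : List Int) (i : Nat) =>
        let v := PySem.Int.band (h i) ((1 <<< s) - 1)
        if s ≠ 0 then
          let k := i % s
          let rot := PySem.Int.band (PySem.Int.bor (v <<< k) (v >>> (s - k))) ((1 <<< s) - 1)
          let w : Int := 1 <<< (7 - i)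
          (List.range s).foldl (fun (rows : List Int) (r : Nat) =>
            rows.set r (rows.getD r 0 + PySem.Int.band (rot >>> r) 1 * w)) rows
        else rows) (List.replicate s 0) := by
  rcases Nat.eq_zero_or_pos s with rfl | hs
  · simp
  · have hne : s ≠ 0 := by omega
    have hF : (fun (rows : List Int) (i : Nat) =>
        let v := PySem.Int.band (h i) ((1 <<< s) - 1)
        if s ≠ 0 then
          let k := i % s
          let rot := PySem.Int.band (PySem.Int.bor (v <<< k) (v >>> (s - k))) ((1 <<< s) - 1)
          let w : Int := 1 <<< (7 - i)
          (List.range s).foldl (fun (rows : List Int) (r : Nat) =>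
            rows.set r (rows.getD r 0 + PySem.Int.band (rot >>> r) 1 * w)) rows
        else rows)
        = (fun (rows : List Int) (i : Nat) =>
          (List.range s).foldl (fun (rows : List Int) (r : Nat) =>
            rows.set r (rows.getD r 0 + PySem.Int.band ((PySem.Int.band (PySem.Int.bor
              ((PySem.Int.band (h i) ((1 <<< s) - 1)) <<< (i % s))
              ((PySem.Int.band (h i) ((1 <<< s) - 1)) >>> (s - i % s))) ((1 <<< s) - 1)) >>> r) 1
              * (1 <<< (7 - i)))) rows) := by
      funext rows i
      simp only [if_pos hne]
    rw [hF]
    obtain ⟨hl, hv⟩ := scatter_outer s (fun i r => PySem.Int.band ((PySem.Int.band (PySem.Int.bor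
        ((PySem.Int.band (h i) ((1 <<< s) - 1)) <<< (i % s))
        ((PySem.Int.band (h i) ((1 <<< s) - 1)) >>> (s - i % s))) ((1 <<< s) - 1)) >>> r) 1
        * (1 <<< (7 - i))) 8
    rw [PySem.List.foldl_append_singleton_eq_map, List.nil_append]
    apply List.ext_getElem
    · rw [List.length_map, List.length_range, hl]
    · intro r h1 h2
      have hrs : r < s := by simpa using h1
      rw [List.getElem_map, List.getElem_range]
      rw [List.getElem_eq_getD 0, hv r hrs]
      exact rowEq s hs h r hrs

-- ===== VERDICT (by name: the statement is the Claim_ definition above) =====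
theorem build_cw_from_gnu_spec : Claim_equal_build_cw_from_gnu := by
  intro gnu_vals sf use_gray _ _
  show build_cw_from_gnu gnu_vals sf use_gray = build_cw_from_gnu_alt gnu_vals sf use_gray
  exact (master ((sf - 2).toNat)
      (fun i => PySem.Int.band
        (if use_gray then gray_encode (gnu_vals.getD i 0) else gnu_vals.getD i 0)
        ((1 <<< (sf - 2).toNat) - 1))).trans
    (bridge ((sf - 2).toNat)
      (fun i => if use_gray then gray_encode (gnu_vals.getD i 0) else gnu_vals.getD i 0))
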